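-- pv_equiv track=rewrite | github.com/leoisl/pandora_paper_roc | evaluate/utils.py | arg_ranges
-- ===== SOURCE A (Python) =====
-- from typing import List, Tuple
--
-- def arg_ranges(array: List[int]) -> List[Tuple[int, int]]:
--     if not array:
--         return []
--
--     argranges = []
--     index_cache = [0]
--     previous = array[0]
--
--     for index in range(1, len(array)):
--         current = array[index]
--         if consecutive(previous, current):
--             index_cache.append(index)
--         else:
--             argranges.append(index_cache)
--             index_cache = [index]
--         previous = current
--
--     argranges.append(index_cache)
--
--     return collapse_ranges(argranges)
--
-- def consecutive(x: int, y: int) -> bool: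
--     diff = x - y
--     return -1 <= diff <= 1
--
-- def collapse_ranges(ranges: List[List[int]]) -> List[Tuple[int, int]]:
--     return [(xs[0], xs[-1] + 1) for xs in ranges if xs]
-- ===== SOURCE B (Python) =====
-- def arg_ranges(array):
--     if not array:
--         return []
--     n = len(array)
--     breaks = [i for i, (x, y) in enumerate(zip(array, array[1:]), start=1) if abs(y - x) > 1]
--     boundaries = [0] + breaks + [n]
--     return list(zip(boundaries, boundaries[1:]))
-- ===== Notes on version B (the rewrite author's own statement) =====
-- stated objective: alternative
-- what changed: Replaces A's accumulating scan that builds explicit index-list groups and collapses them with a two-phase construction: collect break indices from adjacent pairs, then zip the boundary list (zero, breaks, n) with its tail.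
import Mathlib
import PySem

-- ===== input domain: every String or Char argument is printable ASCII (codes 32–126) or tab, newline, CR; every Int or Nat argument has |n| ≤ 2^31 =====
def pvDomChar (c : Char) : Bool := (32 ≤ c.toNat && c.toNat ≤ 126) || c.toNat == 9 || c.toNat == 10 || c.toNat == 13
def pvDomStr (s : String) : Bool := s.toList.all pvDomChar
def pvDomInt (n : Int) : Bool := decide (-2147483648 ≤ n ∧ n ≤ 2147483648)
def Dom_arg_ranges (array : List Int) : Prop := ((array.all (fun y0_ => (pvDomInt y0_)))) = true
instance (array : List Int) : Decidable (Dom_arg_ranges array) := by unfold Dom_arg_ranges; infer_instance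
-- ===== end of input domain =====

-- B replaces A's accumulating group-list scan with a break-point computation over adjacent pairs,
-- zipping the boundary list with its tail (objective: alternative decomposition, same O(n) cost).


-- ===== PORT A =====
def pyConsecutive (x y : Int) : Bool := decide (-1 ≤ x - y) && decide (x - y ≤ 1)

-- xs[0] / xs[-1] ported as headD/getLastD: exact here because the comprehension filters out empty lists first
def collapse_ranges (ranges : List (List Int)) : List (Int × Int) :=
  (ranges.filter (fun xs => !xs.isEmpty)).map (fun xs => (xs.headD 0, xs.getLastD 0 + 1))

-- the for-loop over range(1, len(array)) with current = array[index], as a recursion over the tail with an index counter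
def argRangesLoop (l : List Int) (index : Int) (s : List (List Int) × List Int × Int) :
    List (List Int) × List Int × Int :=
  match l with
  | [] => s
  | current :: rest =>
      if pyConsecutive s.2.2 current then
        argRangesLoop rest (index + 1) (s.1, s.2.1 ++ [index], current)
      else
        argRangesLoop rest (index + 1) (s.1 ++ [s.2.1], [index], current)

def arg_ranges (array : List Int) : List (Int × Int) :=
  match array with
  | [] => []
  | a0 :: rest =>
      let st := argRangesLoop rest 1 ([], [(0 : Int)], a0)
      collapse_ranges (st.1 ++ [st.2.1])

-- ===== PORT B =====
-- the break-index comprehension: enumerate(zip(array, array[1:]), start=1) filtered by abs(y-x) > 1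
def breaksFrom (i : Int) (ps : List (Int × Int)) : List Int :=
  match ps with
  | [] => []
  | (x, y) :: rest =>
      if 1 < (y - x).natAbs then i :: breaksFrom (i + 1) rest else breaksFrom (i + 1) rest

def arg_ranges_alt (array : List Int) : List (Int × Int) :=
  match array with
  | [] => []
  | _ :: _ =>
      let n : Int := array.length
      let breaks := breaksFrom 1 (array.zip array.tail)
      let boundaries := 0 :: (breaks ++ [n])
      boundaries.zip boundaries.tail

-- ===== PRECONDITION & SPEC =====
def Spec_arg_ranges (array : List Int) (out : List (Int × Int)) : Prop := out = arg_ranges_alt array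
instance (array : List Int) (out : List (Int × Int)) : Decidable (Spec_arg_ranges array out) := by unfold Spec_arg_ranges; infer_instance

-- ===== CLAIM (what is proved, stated in full; the proofs are below) =====
def Claim_equal_arg_ranges : Prop := ∀ (array : List Int), Dom_arg_ranges array → Spec_arg_ranges array (arg_ranges array)

-- ===== LEMMAS AND PROOFS =====

-- common reference: the runs of a0 :: l, prev = previous value, start = start index of current run, i = index of head of l
def refRuns (prev start i : Int) (l : List Int) : List (Int × Int) :=
  match l with
  | [] => [(start, i)]
  | c :: rest =>
      if pyConsecutive prev c then refRuns c start (i + 1) rest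
      else (start, i) :: refRuns c i (i + 1) rest

lemma collapse_append (r s : List (List Int)) :
    collapse_ranges (r ++ s) = collapse_ranges r ++ collapse_ranges s := by
  simp [collapse_ranges]

lemma loop_eq_ref (l : List Int) (i : Int) (gs : List (List Int)) (cache : List Int) (prev start : Int)
    (hne : cache ≠ []) (hh : cache.headD 0 = start) (hl : cache.getLastD 0 + 1 = i) :
    collapse_ranges ((argRangesLoop l i (gs, cache, prev)).1 ++ [(argRangesLoop l i (gs, cache, prev)).2.1])
      = collapse_ranges gs ++ refRuns prev start i l := by
  induction l generalizing i gs cache prev start with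
  | nil =>
      cases cache with
      | nil => exact absurd rfl hne
      | cons a t =>
          simp [argRangesLoop, refRuns, collapse_ranges] at hh hl ⊢
          exact ⟨hh, hl⟩
  | cons c rest ih =>
      simp only [argRangesLoop, refRuns]
      by_cases hc : pyConsecutive prev c = true
      · simp only [if_pos hc]
        rw [ih (i + 1) gs (cache ++ [i]) c start (by simp)
              (by cases cache with | nil => exact absurd rfl hne | cons a t => simpa using hh)
              (by simp)]
      · simp only [if_neg hc]
        rw [ih (i + 1) (gs ++ [cache]) [i] c i (by simp) (by simp) (by simp),
            collapse_append]
        cases cache with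
        | nil => exact absurd rfl hne
        | cons a t =>
            simp [collapse_ranges] at hh hl ⊢
            exact ⟨hh, hl⟩

lemma zip_adj_cons (a b : Int) (t : List Int) :
    (a :: b :: t).zip ((a :: b :: t).tail) = (a, b) :: ((b :: t).zip t) := by
  simp

lemma breaks_eq_ref (l : List Int) (prev start i : Int) :
    ((start :: (breaksFrom i ((prev :: l).zip l) ++ [i + (l.length : Int)])).zip
      ((start :: (breaksFrom i ((prev :: l).zip l) ++ [i + (l.length : Int)])).tail))
      = refRuns prev start i l := by
  induction l generalizing prev start i with
  | nil => simp [breaksFrom, refRuns]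
  | cons c rest ih =>
      have hzip : (prev :: c :: rest).zip (c :: rest) = (prev, c) :: ((c :: rest).zip rest) := by simp
      rw [hzip]
      simp only [breaksFrom]
      have hlen : i + ((c :: rest).length : Int) = (i + 1) + (rest.length : Int) := by
        simp; ring
      by_cases hc : pyConsecutive prev c
      · have hb : ¬ 1 < (c - prev).natAbs := by
          simp [pyConsecutive] at hc; omega
        simp only [hb, if_false, refRuns, hc, if_true, hlen]
        exact ih c start (i + 1)
      · have hb : 1 < (c - prev).natAbs := by
          simp [pyConsecutive] at hc; omega
        simp only [hb, if_true, refRuns, hc, hlen]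
        rw [List.cons_append, zip_adj_cons]
        exact congrArg _ (ih c i (i + 1))

-- ===== VERDICT (by name: the statement is the Claim_ definition above) =====
theorem arg_ranges_spec : Claim_equal_arg_ranges := by
  intro array _
  unfold Spec_arg_ranges
  cases array with
  | nil => rfl
  | cons a0 rest =>
      show arg_ranges (a0 :: rest) = arg_ranges_alt (a0 :: rest)
      unfold arg_ranges arg_ranges_alt
      simp only [List.tail_cons]
      rw [loop_eq_ref rest 1 [] [(0 : Int)] a0 0 (by simp) (by simp) (by simp)]
      have h := breaks_eq_ref rest a0 0 1
      have hlen : ((a0 :: rest).length : Int) = 1 + (rest.length : Int) := by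
        simp; ring
      rw [hlen]
      rw [← h]
      simp [collapse_ranges]
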